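-- pv_equiv track=rewrite | github.com/Ravish-kum/dekhatis_user_backend | backend/task.py | find_salary_range
-- ===== SOURCE A (Python) =====
-- def find_salary_range(income):
--     ranges=[(100000, 200000),(200000, 300000),(300000, 400000),(400000, 500000),(500000, 600000),(600000, 700000),(700000, 800000),(800000, 900000),
--             (900000, 1000000),(1000000, 2000000),(2000000, 3000000),(3000000, 4000000),(4000000, 5000000)
--             ]
--
--     income= int(income)
--
--     if income <100000:
--         return "100000-200000"
--     for lower, upper in ranges:
--         if lower <= income < upper:
--             return f"{lower}-{upper}"
--     else:
--         return "4000000-5000000"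
-- ===== SOURCE B (Python) =====
-- def find_salary_range(income):
--     income = int(income)
--     if income < 100000:
--         return "100000-200000"
--     if income >= 5000000:
--         return "4000000-5000000"
--     width = 100000 if income < 1000000 else 1000000
--     lower = (income // width) * width
--     return f"{lower}-{lower + width}"
-- ===== Notes on version B (the rewrite author's own statement) =====
-- stated objective: simpler
-- what changed: Replaced the linear scan over the hard-coded list of 13 (lower, upper) bucket pairs by a closed-form arithmetic bucket computation: pick the bucket width (a lakh below a million, a million above), compute lower = (income // width) * width, and clamp at the bottom and top buckets.
import Mathlib
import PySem

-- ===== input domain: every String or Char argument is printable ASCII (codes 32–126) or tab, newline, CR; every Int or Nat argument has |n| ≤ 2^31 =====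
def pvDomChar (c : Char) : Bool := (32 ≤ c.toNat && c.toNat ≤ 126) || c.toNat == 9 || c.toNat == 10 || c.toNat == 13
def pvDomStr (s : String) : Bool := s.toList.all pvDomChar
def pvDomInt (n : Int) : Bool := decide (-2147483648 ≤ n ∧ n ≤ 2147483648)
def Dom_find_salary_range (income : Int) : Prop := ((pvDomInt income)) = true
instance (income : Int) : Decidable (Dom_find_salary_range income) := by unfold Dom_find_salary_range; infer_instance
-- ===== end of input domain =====

-- B replaces A's linear scan over the fixed bucket list by a closed-form arithmetic bucket computation (objective: simpler).

-- ===== PORT A =====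
-- the for-else loop over the fixed range list: first (lower, upper) with lower <= income < upper, else none
def pvLoopA : List (Int × Int) → Int → Option String
  | [], _ => none
  | (lower, upper) :: rest, income =>
      if lower ≤ income ∧ income < upper then
        some (PySem.Int.toStr lower ++ "-" ++ PySem.Int.toStr upper)
      else pvLoopA rest income

def find_salary_range (income : Int) : String :=
  let ranges : List (Int × Int) :=
    [(100000, 200000), (200000, 300000), (300000, 400000), (400000, 500000), (500000, 600000),
     (600000, 700000), (700000, 800000), (800000, 900000), (900000, 1000000), (1000000, 2000000),
     (2000000, 3000000), (3000000, 4000000), (4000000, 5000000)]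
  if income < 100000 then "100000-200000"
  else (pvLoopA ranges income).getD "4000000-5000000"

-- ===== PORT B =====
def find_salary_range_alt (income : Int) : String :=
  if income < 100000 then "100000-200000"
  else if 5000000 ≤ income then "4000000-5000000"
  else
    let width : Int := if income < 1000000 then 100000 else 1000000
    let lower : Int := PySem.Int.floordiv income width * width
    PySem.Int.toStr lower ++ "-" ++ PySem.Int.toStr (lower + width)

-- ===== PRECONDITION & SPEC =====
def Spec_find_salary_range (income : Int) (out : String) : Prop := out = find_salary_range_alt income
instance (income : Int) (out : String) : Decidable (Spec_find_salary_range income out) := by unfold Spec_find_salary_range; infer_instance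

-- ===== CLAIM (what is proved, stated in full; the proofs are below) =====
def Claim_equal_find_salary_range : Prop := ∀ (income : Int), Dom_find_salary_range income → Spec_find_salary_range income (find_salary_range income)

-- ===== LEMMAS AND PROOFS =====
lemma pvBucket (inc w k : Int) (hw : 0 < w) (h1 : k * w ≤ inc) (h2 : inc < (k + 1) * w) :
    PySem.Int.floordiv inc w = k :=
  (PySem.Int.floordiv_eq_iff_of_pos hw).2 ⟨h1, h2⟩

lemma pvAlt_mid (inc k : Int) (h1 : 100000 ≤ inc)
    (hb1 : k * 100000 ≤ inc) (hb2 : inc < (k + 1) * 100000) (hk : inc < 1000000) :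
    find_salary_range_alt inc =
      PySem.Int.toStr (k * 100000) ++ "-" ++ PySem.Int.toStr (k * 100000 + 100000) := by
  have hf := pvBucket inc 100000 k (by norm_num) hb1 hb2
  unfold find_salary_range_alt
  rw [if_neg (by omega), if_neg (by omega)]
  simp only [if_pos hk, hf]

lemma pvAlt_big (inc k : Int) (h1 : 1000000 ≤ inc)
    (hb1 : k * 1000000 ≤ inc) (hb2 : inc < (k + 1) * 1000000) (hk : inc < 5000000) :
    find_salary_range_alt inc =
      PySem.Int.toStr (k * 1000000) ++ "-" ++ PySem.Int.toStr (k * 1000000 + 1000000) := by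
  have hf := pvBucket inc 1000000 k (by norm_num) hb1 hb2
  unfold find_salary_range_alt
  rw [if_neg (by omega), if_neg (by omega)]
  simp only [if_neg (by omega : ¬ inc < 1000000), hf]

-- ===== VERDICT (by name: the statement is the Claim_ definition above) =====
theorem find_salary_range_spec : Claim_equal_find_salary_range := by
  intro income _
  show find_salary_range income = find_salary_range_alt income
  by_cases h0 : income < 100000
  · unfold find_salary_range find_salary_range_alt
    rw [if_pos h0, if_pos h0]
  · unfold find_salary_range
    rw [if_neg h0]
    by_cases h1 : income < 200000
    · rw [show pvLoopA _ income = some _ from by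
        simp only [pvLoopA]; rw [if_pos ⟨by omega, h1⟩], Option.getD_some,
        pvAlt_mid income 1 (by omega) (by omega) (by omega) (by omega)]
      norm_num
    by_cases h2 : income < 300000
    · rw [show pvLoopA _ income = some _ from by
        simp only [pvLoopA]; rw [if_neg (by omega), if_pos ⟨by omega, h2⟩], Option.getD_some,
        pvAlt_mid income 2 (by omega) (by omega) (by omega) (by omega)]
      norm_num
    by_cases h3 : income < 400000
    · rw [show pvLoopA _ income = some _ from by
        simp only [pvLoopA]; rw [if_neg (by omega), if_neg (by omega), if_pos ⟨by omega, h3⟩], Option.getD_some,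
        pvAlt_mid income 3 (by omega) (by omega) (by omega) (by omega)]
      norm_num
    by_cases h4 : income < 500000
    · rw [show pvLoopA _ income = some _ from by
        simp only [pvLoopA]
        rw [if_neg (by omega), if_neg (by omega), if_neg (by omega), if_pos ⟨by omega, h4⟩], Option.getD_some,
        pvAlt_mid income 4 (by omega) (by omega) (by omega) (by omega)]
      norm_num
    by_cases h5 : income < 600000
    · rw [show pvLoopA _ income = some _ from by
        simp only [pvLoopA]
        rw [if_neg (by omega), if_neg (by omega), if_neg (by omega), if_neg (by omega),
          if_pos ⟨by omega, h5⟩], Option.getD_some,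
        pvAlt_mid income 5 (by omega) (by omega) (by omega) (by omega)]
      norm_num
    by_cases h6 : income < 700000
    · rw [show pvLoopA _ income = some _ from by
        simp only [pvLoopA]
        rw [if_neg (by omega), if_neg (by omega), if_neg (by omega), if_neg (by omega),
          if_neg (by omega), if_pos ⟨by omega, h6⟩], Option.getD_some,
        pvAlt_mid income 6 (by omega) (by omega) (by omega) (by omega)]
      norm_num
    by_cases h7 : income < 800000
    · rw [show pvLoopA _ income = some _ from by
        simp only [pvLoopA]
        rw [if_neg (by omega), if_neg (by omega), if_neg (by omega), if_neg (by omega),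
          if_neg (by omega), if_neg (by omega), if_pos ⟨by omega, h7⟩], Option.getD_some,
        pvAlt_mid income 7 (by omega) (by omega) (by omega) (by omega)]
      norm_num
    by_cases h8 : income < 900000
    · rw [show pvLoopA _ income = some _ from by
        simp only [pvLoopA]
        rw [if_neg (by omega), if_neg (by omega), if_neg (by omega), if_neg (by omega),
          if_neg (by omega), if_neg (by omega), if_neg (by omega), if_pos ⟨by omega, h8⟩], Option.getD_some,
        pvAlt_mid income 8 (by omega) (by omega) (by omega) (by omega)]
      norm_num
    by_cases h9 : income < 1000000
    · rw [show pvLoopA _ income = some _ from by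
        simp only [pvLoopA]
        rw [if_neg (by omega), if_neg (by omega), if_neg (by omega), if_neg (by omega),
          if_neg (by omega), if_neg (by omega), if_neg (by omega), if_neg (by omega),
          if_pos ⟨by omega, h9⟩], Option.getD_some,
        pvAlt_mid income 9 (by omega) (by omega) (by omega) (by omega)]
      norm_num
    by_cases h10 : income < 2000000
    · rw [show pvLoopA _ income = some _ from by
        simp only [pvLoopA]
        rw [if_neg (by omega), if_neg (by omega), if_neg (by omega), if_neg (by omega),
          if_neg (by omega), if_neg (by omega), if_neg (by omega), if_neg (by omega),
          if_neg (by omega), if_pos ⟨by omega, h10⟩], Option.getD_some,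
        pvAlt_big income 1 (by omega) (by omega) (by omega) (by omega)]
      norm_num
    by_cases h11 : income < 3000000
    · rw [show pvLoopA _ income = some _ from by
        simp only [pvLoopA]
        rw [if_neg (by omega), if_neg (by omega), if_neg (by omega), if_neg (by omega),
          if_neg (by omega), if_neg (by omega), if_neg (by omega), if_neg (by omega),
          if_neg (by omega), if_neg (by omega), if_pos ⟨by omega, h11⟩], Option.getD_some,
        pvAlt_big income 2 (by omega) (by omega) (by omega) (by omega)]
      norm_num
    by_cases h12 : income < 4000000
    · rw [show pvLoopA _ income = some _ from by
        simp only [pvLoopA]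
        rw [if_neg (by omega), if_neg (by omega), if_neg (by omega), if_neg (by omega),
          if_neg (by omega), if_neg (by omega), if_neg (by omega), if_neg (by omega),
          if_neg (by omega), if_neg (by omega), if_neg (by omega), if_pos ⟨by omega, h12⟩],
        Option.getD_some,
        pvAlt_big income 3 (by omega) (by omega) (by omega) (by omega)]
      norm_num
    by_cases h13 : income < 5000000
    · rw [show pvLoopA _ income = some _ from by
        simp only [pvLoopA]
        rw [if_neg (by omega), if_neg (by omega), if_neg (by omega), if_neg (by omega),
          if_neg (by omega), if_neg (by omega), if_neg (by omega), if_neg (by omega),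
          if_neg (by omega), if_neg (by omega), if_neg (by omega), if_neg (by omega),
          if_pos ⟨by omega, h13⟩], Option.getD_some,
        pvAlt_big income 4 (by omega) (by omega) (by omega) (by omega)]
      norm_num
    · rw [show pvLoopA _ income = none from by
        simp only [pvLoopA]
        rw [if_neg (by omega), if_neg (by omega), if_neg (by omega), if_neg (by omega),
          if_neg (by omega), if_neg (by omega), if_neg (by omega), if_neg (by omega),
          if_neg (by omega), if_neg (by omega), if_neg (by omega), if_neg (by omega),
          if_neg (by omega)], Option.getD_none]
      unfold find_salary_range_alt
      rw [if_neg h0, if_pos (by omega)]
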